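-- pv_equiv track=rewrite | github.com/Sanyavas/assistant-team-project | clean_folder.py | sorter
-- ===== SOURCE A (Python) =====
-- file_extension = {"images": ['.jpeg', '.png', '.jpg', '.svg'],
--                   "documents": ['.doc', '.docx', '.txt', '.pdf', '.xlsx', '.pptx'],
--                   "archives": ['.zip', '.gz', '.tar'],
--                   "audio": ['.mp3', '.ogg', '.wav', '.amr'],
--                   "video": ['.avi', '.mp4', '.mov', '.mkv'],
--                   "different": None
--                   }
--
-- def sorter(files):
--     chars = {
--         "images": [],
--         "documents": [],
--         "archives": [],
--         "audio": [],
--         "video": [],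
--         "different": [],
--     }
--     for file in files:
--         suff_name = file[file.rfind("."):]
--         if suff_name in file_extension["images"]:
--             chars["images"].append(file)
--         elif suff_name in file_extension["documents"]:
--             chars["documents"].append(file)
--         elif suff_name in file_extension["archives"]:
--             chars["archives"].append(file)
--         elif suff_name in file_extension["audio"]:
--             chars["audio"].append(file)
--         elif suff_name in file_extension["video"]:
--             chars["video"].append(file)
--         else:
--             chars["different"].append(file)
--
--     return chars
-- ===== SOURCE B (Python) =====
-- file_extension = {"images": ['.jpeg', '.png', '.jpg', '.svg'],
--                   "documents": ['.doc', '.docx', '.txt', '.pdf', '.xlsx', '.pptx'],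
--                   "archives": ['.zip', '.gz', '.tar'],
--                   "audio": ['.mp3', '.ogg', '.wav', '.amr'],
--                   "video": ['.avi', '.mp4', '.mov', '.mkv'],
--                   "different": None
--                   }
--
--
-- def sorter(files):
--     # staged sieve: one filtering pass per category over the still-unclaimed files;
--     # whatever survives every sieve is "different"
--     chars = {}
--     remaining = list(files)
--     for cat, exts in file_extension.items():
--         if exts is None:
--             chars[cat] = remaining
--         else:
--             chars[cat] = [f for f in remaining if f[f.rfind("."):] in exts]
--             remaining = [f for f in remaining if f[f.rfind("."):] not in exts]
--     return chars
-- ===== Notes on version B (the rewrite author's own statement) =====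
-- stated objective: alternative
-- what changed: Instead of A's single pass that classifies each file through a five-branch elif chain, B runs one filtering pass per category over the shrinking list of still-unclaimed files (a staged sieve/partition), with the leftover list becoming 'different'.
import Mathlib
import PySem

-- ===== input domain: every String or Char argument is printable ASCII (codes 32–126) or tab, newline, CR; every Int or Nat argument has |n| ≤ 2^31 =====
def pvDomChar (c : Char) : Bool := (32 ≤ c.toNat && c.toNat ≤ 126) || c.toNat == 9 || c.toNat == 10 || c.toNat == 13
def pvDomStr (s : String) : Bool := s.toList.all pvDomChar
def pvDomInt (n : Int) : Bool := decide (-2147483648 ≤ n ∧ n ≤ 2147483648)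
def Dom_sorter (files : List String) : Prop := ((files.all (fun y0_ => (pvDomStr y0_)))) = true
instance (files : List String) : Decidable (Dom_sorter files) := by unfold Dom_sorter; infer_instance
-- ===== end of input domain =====

set_option maxHeartbeats 2000000

-- B replaces A's per-file five-branch elif classification by a staged sieve: one filtering pass per category over the still-unclaimed files, the leftovers becoming "different"; same return value (no speed claim).

-- ===== PORT A =====
-- module constant file_extension (the None entry is kept as none)
def fileExtension : PySem.Dict String (Option (List String)) :=
  PySem.Dict.ofList [("images", some [".jpeg", ".png", ".jpg", ".svg"]),
    ("documents", some [".doc", ".docx", ".txt", ".pdf", ".xlsx", ".pptx"]),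
    ("archives", some [".zip", ".gz", ".tar"]),
    ("audio", some [".mp3", ".ogg", ".wav", ".amr"]),
    ("video", some [".avi", ".mp4", ".mov", ".mkv"]),
    ("different", none)]

-- suff_name = file[file.rfind("."):]
def suffName (file : String) : String :=
  PySem.Str.slice file (some (PySem.Str.rfind file ".")) none

-- the body of A's for-loop: the five-way membership chain
def sorterStep (chars : PySem.Dict String (List String)) (file : String) : PySem.Dict String (List String) :=
  let suff := suffName file
  if ((fileExtension.getD "images" none).getD []).contains suff then
    chars.modify "images" [] (· ++ [file])
  else if ((fileExtension.getD "documents" none).getD []).contains suff then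
    chars.modify "documents" [] (· ++ [file])
  else if ((fileExtension.getD "archives" none).getD []).contains suff then
    chars.modify "archives" [] (· ++ [file])
  else if ((fileExtension.getD "audio" none).getD []).contains suff then
    chars.modify "audio" [] (· ++ [file])
  else if ((fileExtension.getD "video" none).getD []).contains suff then
    chars.modify "video" [] (· ++ [file])
  else
    chars.modify "different" [] (· ++ [file])

def sorter (files : List String) : List (String × List String) :=
  let chars : PySem.Dict String (List String) :=
    PySem.Dict.ofList [("images", []), ("documents", []), ("archives", []),
      ("audio", []), ("video", []), ("different", [])]
  (files.foldl sorterStep chars).items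

-- ===== PORT B =====
-- Source B's loop body: for one (cat, exts) entry, claim the matching files and shrink 'remaining'
def sieveStep (st : PySem.Dict String (List String) × List String)
    (p : String × Option (List String)) : PySem.Dict String (List String) × List String :=
  match p.2 with
  | none => (st.1.insert p.1 st.2, st.2)
  | some exts =>
      (st.1.insert p.1 (st.2.filter (fun f => exts.contains (suffName f))),
       st.2.filter (fun f => !exts.contains (suffName f)))

def sorter_alt (files : List String) : List (String × List String) :=
  (fileExtension.items.foldl sieveStep (PySem.Dict.empty, files)).1.items

-- ===== PRECONDITION & SPEC =====
def Spec_sorter (files : List String) (out : List (String × List String)) : Prop := out = sorter_alt files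
instance (files : List String) (out : List (String × List String)) : Decidable (Spec_sorter files out) := by unfold Spec_sorter; infer_instance

-- ===== CLAIM (what is proved, stated in full; the proofs are below) =====
def Claim_equal_sorter : Prop := ∀ (files : List String), Dom_sorter files → Spec_sorter files (sorter files)

-- ===== LEMMAS AND PROOFS =====
-- the category A's elif chain assigns to a file
def catA (f : String) : String :=
  if ([".jpeg", ".png", ".jpg", ".svg"]).contains (suffName f) then "images"
  else if ([".doc", ".docx", ".txt", ".pdf", ".xlsx", ".pptx"]).contains (suffName f) then "documents"
  else if ([".zip", ".gz", ".tar"]).contains (suffName f) then "archives"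
  else if ([".mp3", ".ogg", ".wav", ".amr"]).contains (suffName f) then "audio"
  else if ([".avi", ".mp4", ".mov", ".mkv"]).contains (suffName f) then "video"
  else "different"

theorem sorterStep_eq (chars : PySem.Dict String (List String)) (file : String) :
    sorterStep chars file = chars.modify (catA file) [] (· ++ [file]) := by
  unfold sorterStep catA
  dsimp only
  rw [show (fileExtension.getD "images" none).getD ([] : List String) = [".jpeg", ".png", ".jpg", ".svg"] from by decide,
      show (fileExtension.getD "documents" none).getD ([] : List String) = [".doc", ".docx", ".txt", ".pdf", ".xlsx", ".pptx"] from by decide,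
      show (fileExtension.getD "archives" none).getD ([] : List String) = [".zip", ".gz", ".tar"] from by decide,
      show (fileExtension.getD "audio" none).getD ([] : List String) = [".mp3", ".ogg", ".wav", ".amr"] from by decide,
      show (fileExtension.getD "video" none).getD ([] : List String) = [".avi", ".mp4", ".mov", ".mkv"] from by decide]
  split_ifs <;> rfl

-- A's fold, written as a grouping fold over (key, value) pairs
theorem sorter_fold_eq (files : List String) (d : PySem.Dict String (List String)) :
    files.foldl sorterStep d =
      (files.map (fun f => (catA f, f))).foldl (fun d p => d.modify p.1 [] (· ++ [p.2])) d := by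
  rw [List.foldl_map]
  exact PySem.List.foldl_congr_mem _ _ _ _ (fun d f _ => sorterStep_eq d f)

theorem catA_mem (f : String) :
    catA f ∈ ["images", "documents", "archives", "audio", "video", "different"] := by
  unfold catA; split_ifs <;> simp

-- value of A's result at one of the six keys
theorem sorter_getD (files : List String) (c : String) :
    (files.foldl sorterStep (PySem.Dict.ofList [("images", []), ("documents", []), ("archives", []),
      ("audio", []), ("video", []), ("different", [])])).getD c [] =
    (PySem.Dict.ofList [("images", ([] : List String)), ("documents", []), ("archives", []),
      ("audio", []), ("video", []), ("different", [])]).getD c [] ++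
      (files.filter (fun f => catA f == c)) := by
  rw [sorter_fold_eq, PySem.Dict.getD_foldl_modify_append]
  congr 1
  rw [List.filter_map, List.map_map]
  simp [Function.comp_def]

theorem sorter_keys (files : List String) :
    (files.foldl sorterStep (PySem.Dict.ofList [("images", []), ("documents", []), ("archives", []),
      ("audio", []), ("video", []), ("different", [])])).keys =
    ["images", "documents", "archives", "audio", "video", "different"] := by
  rw [sorter_fold_eq, PySem.Dict.keys_foldl_modify_key (key := Prod.fst)]
  rw [PySem.Set.update_eq_append_filter]
  have h : ∀ y ∈ PySem.Set.ofList ((files.map (fun f => (catA f, f))).map Prod.fst),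
      ¬ (PySem.Set.contains (PySem.Dict.ofList [("images", ([] : List String)), ("documents", []), ("archives", []),
        ("audio", []), ("video", []), ("different", [])]).keys y = false) := by
    intro y hy
    rw [PySem.Set.mem_ofList] at hy
    simp only [List.map_map, List.mem_map, Function.comp_def] at hy
    obtain ⟨f, _, rfl⟩ := hy
    have hk : (PySem.Dict.ofList [("images", ([] : List String)), ("documents", []), ("archives", []),
        ("audio", []), ("video", []), ("different", [])]).keys =
        ["images", "documents", "archives", "audio", "video", "different"] := by decide
    rw [hk]
    have hm := catA_mem f
    simp only [List.mem_cons, List.not_mem_nil, or_false] at hm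
    simp only [PySem.Set.contains_eq_listContains, List.contains_eq_mem, List.mem_cons,
      List.not_mem_nil, or_false, decide_eq_false_iff_not, not_or]
    tauto
  rw [List.filter_eq_nil_iff.2 (fun y hy => by simpa using h y hy)]
  rfl

-- A's result, written out
theorem sorter_eq (files : List String) :
    sorter files = [("images", files.filter (fun f => catA f == "images")),
      ("documents", files.filter (fun f => catA f == "documents")),
      ("archives", files.filter (fun f => catA f == "archives")),
      ("audio", files.filter (fun f => catA f == "audio")),
      ("video", files.filter (fun f => catA f == "video")),
      ("different", files.filter (fun f => catA f == "different"))] := by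
  unfold sorter
  have hnd : (files.foldl sorterStep (PySem.Dict.ofList [("images", []), ("documents", []), ("archives", []),
      ("audio", []), ("video", []), ("different", [])])).keys.Nodup := by
    rw [sorter_keys]; decide
  rw [PySem.Dict.items_eq_map_keys _ hnd []]
  rw [sorter_keys]
  simp only [List.map_cons, List.map_nil, sorter_getD]
  rfl

-- B's result, written out (the literal 6-entry fold unfolds)
theorem sorter_alt_eq (files : List String) :
    sorter_alt files = [("images", files.filter (fun f => ([".jpeg", ".png", ".jpg", ".svg"]).contains (suffName f))),
      ("documents", ((files.filter (fun f => !([".jpeg", ".png", ".jpg", ".svg"]).contains (suffName f))).filter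
        (fun f => ([".doc", ".docx", ".txt", ".pdf", ".xlsx", ".pptx"]).contains (suffName f)))),
      ("archives", (((files.filter (fun f => !([".jpeg", ".png", ".jpg", ".svg"]).contains (suffName f))).filter
        (fun f => !([".doc", ".docx", ".txt", ".pdf", ".xlsx", ".pptx"]).contains (suffName f))).filter
        (fun f => ([".zip", ".gz", ".tar"]).contains (suffName f)))),
      ("audio", ((((files.filter (fun f => !([".jpeg", ".png", ".jpg", ".svg"]).contains (suffName f))).filter
        (fun f => !([".doc", ".docx", ".txt", ".pdf", ".xlsx", ".pptx"]).contains (suffName f))).filter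
        (fun f => !([".zip", ".gz", ".tar"]).contains (suffName f))).filter
        (fun f => ([".mp3", ".ogg", ".wav", ".amr"]).contains (suffName f)))),
      ("video", (((((files.filter (fun f => !([".jpeg", ".png", ".jpg", ".svg"]).contains (suffName f))).filter
        (fun f => !([".doc", ".docx", ".txt", ".pdf", ".xlsx", ".pptx"]).contains (suffName f))).filter
        (fun f => !([".zip", ".gz", ".tar"]).contains (suffName f))).filter
        (fun f => !([".mp3", ".ogg", ".wav", ".amr"]).contains (suffName f))).filter
        (fun f => ([".avi", ".mp4", ".mov", ".mkv"]).contains (suffName f)))),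
      ("different", (((((files.filter (fun f => !([".jpeg", ".png", ".jpg", ".svg"]).contains (suffName f))).filter
        (fun f => !([".doc", ".docx", ".txt", ".pdf", ".xlsx", ".pptx"]).contains (suffName f))).filter
        (fun f => !([".zip", ".gz", ".tar"]).contains (suffName f))).filter
        (fun f => !([".mp3", ".ogg", ".wav", ".amr"]).contains (suffName f))).filter
        (fun f => !([".avi", ".mp4", ".mov", ".mkv"]).contains (suffName f))))] := by
  unfold sorter_alt sieveStep
  rfl

-- ===== VERDICT (by name: the statement is the Claim_ definition above) =====
theorem sorter_spec : Claim_equal_sorter := by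
  intro files _
  unfold Spec_sorter
  rw [sorter_eq, sorter_alt_eq]
  simp only [List.filter_filter, Prod.mk.injEq, List.cons.injEq, and_true]
  refine ⟨⟨trivial, List.filter_congr fun f _ => ?_⟩, ⟨trivial, List.filter_congr fun f _ => ?_⟩,
    ⟨trivial, List.filter_congr fun f _ => ?_⟩, ⟨trivial, List.filter_congr fun f _ => ?_⟩,
    ⟨trivial, List.filter_congr fun f _ => ?_⟩, trivial, List.filter_congr fun f _ => ?_⟩ <;>
  · unfold catA
    split_ifs <;> simp_all
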